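-- pv_equiv track=rewrite | github.com/S0NGMinHyuk/Algorithm-Coding-Test | 프로그래머스/3/43164. 여행경로/여행경로.py | dfs
-- ===== SOURCE A (Python) =====
-- def dfs(data, travel, n):
--     # 모든 항공권을 사용한 경우 / Base Case
--     if len(travel) > n:
--         return [travel]
--
--     # 여행 가능한 동선을 저장하는 리스트
--     result = []
--
--     # 현재 출발지에서 갈 수 있는 도착지 정보를 담은 리스트
--     backup = data[travel[-1]] if travel[-1] in data else []
--
--     for i in range(len(backup)):
--         data[travel[-1]] = backup[:i] + backup[i+1:]    # i번째 도착지로 향하는 티켓 삭제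
--         result += dfs(data, travel+[backup[i]], n)      # i번째 도착지를 출발지로 재귀 호출
--         data[travel[-1]] = backup                       # i번째 도착지로 향하는 티켓 복구
--
--     return result   # 여행 가능한 동선을 리턴
-- ===== SOURCE B (Python) =====
-- def dfs(data, travel, n):
--     # Iterative DFS with an explicit stack (same preorder as the recursion).
--     # Does not mutate the caller's data: each frame carries its own ticket map.
--     results = []
--     stack = [(travel, {k: list(v) for k, v in data.items()})]
--     while stack:
--         path, avail = stack.pop()
--         if len(path) > n:
--             results.append(path)
--             continue
--         backup = avail.get(path[-1], [])
--         children = []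
--         for i in range(len(backup)):
--             child = dict(avail)
--             child[path[-1]] = backup[:i] + backup[i + 1:]
--             children.append((path + [backup[i]], child))
--         stack.extend(reversed(children))
--     return results
-- ===== Notes on version B (the rewrite author's own statement) =====
-- stated objective: alternative
-- what changed: Replaces A's recursive backtracking (mutate the shared dict, recurse, restore) with an iterative DFS over an explicit stack of (path, ticket-map) frames, pushing children in reverse so popping reproduces A's left-to-right preorder; the caller's dict is never mutated.
import Mathlib
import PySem

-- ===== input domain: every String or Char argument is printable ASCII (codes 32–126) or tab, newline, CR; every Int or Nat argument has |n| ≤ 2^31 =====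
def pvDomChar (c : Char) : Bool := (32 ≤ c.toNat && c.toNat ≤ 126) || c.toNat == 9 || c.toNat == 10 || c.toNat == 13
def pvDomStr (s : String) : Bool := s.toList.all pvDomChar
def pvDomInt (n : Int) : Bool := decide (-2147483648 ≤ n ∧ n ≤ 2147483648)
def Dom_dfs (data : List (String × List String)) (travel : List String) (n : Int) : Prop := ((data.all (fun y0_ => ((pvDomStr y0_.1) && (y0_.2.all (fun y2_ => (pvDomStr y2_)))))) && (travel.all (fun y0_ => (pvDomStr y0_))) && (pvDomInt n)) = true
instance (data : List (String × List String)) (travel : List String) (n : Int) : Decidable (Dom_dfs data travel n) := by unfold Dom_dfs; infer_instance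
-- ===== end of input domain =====

-- B replaces A's mutate-recurse-restore backtracking by an explicit-stack iterative DFS
-- over immutable per-frame ticket maps (alternative decomposition; A's mutation of `data`
-- is fully restored before A returns, so only return values are at stake).


-- ===== PORT A =====
-- `data[k] = v` on a Python dict with key k present: overwrite in place.
-- (Both ports only assign to keys that are present; exact for a dict, whose keys are unique.)
def setKey (data : List (String × List String)) (k : String) (v : List String) : List (String × List String) :=
  match data with
  | [] => [(k, v)]
  | p :: rest => if p.1 == k then (k, v) :: rest else p :: setKey rest k v

-- total number of tickets held in the map: the termination measure of the recursion
def totalLen (data : List (String × List String)) : Nat :=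
  (data.map (fun p => p.2.length)).sum

theorem totalLen_setKey (data : List (String × List String)) (k : String) (b v : List String)
    (h : PySem.Dict.get? (PySem.Dict.mk data) k = some b) :
    totalLen (setKey data k v) + b.length = totalLen data + v.length := by
  induction data with
  | nil => simp [PySem.Dict.get?] at h
  | cons p rest ih =>
      rw [PySem.Dict.get?_mk_cons] at h
      by_cases hk : p.1 == k
      · simp [hk] at h
        simp [setKey, hk, totalLen, h]
        omega
      · simp [hk] at h
        have := ih h
        simp [setKey, hk, totalLen] at this ⊢
        omega

theorem totalLen_lt_of_get? (data : List (String × List String)) (k : String) (b : List String)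
    (h : PySem.Dict.get? (PySem.Dict.mk data) k = some b) : b.length ≤ totalLen data := by
  induction data with
  | nil => simp [PySem.Dict.get?] at h
  | cons p rest ih =>
      rw [PySem.Dict.get?_mk_cons] at h
      by_cases hk : p.1 == k
      · simp [hk] at h
        simp [totalLen, ← h]
      · simp [hk] at h
        have := ih h
        simp [totalLen] at this ⊢
        omega

theorem getD_eq_some_of_lt (data : List (String × List String)) (k : String) (i : Nat)
    (hi : i < (PySem.Dict.getD (PySem.Dict.mk data) k []).length) :
    PySem.Dict.get? (PySem.Dict.mk data) k = some (PySem.Dict.getD (PySem.Dict.mk data) k []) := by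
  rcases hq : PySem.Dict.get? (PySem.Dict.mk data) k with _ | b
  · rw [PySem.Dict.getD, hq] at hi
    simp at hi
  · rw [PySem.Dict.getD, hq]
    rfl

-- small abstract arithmetic cores (named so the termination proofs stay tiny terms)
theorem pvArith_core (x y bl i : Nat) (hi : i < bl)
    (h1 : x + bl = y + (min i bl + (bl - (i + 1)))) : x + 1 = y := by
  obtain ⟨k, rfl⟩ := Nat.exists_eq_add_of_lt hi
  rw [Nat.min_eq_left (Nat.le_of_lt hi), Nat.add_right_comm i k 1, Nat.add_sub_cancel_left,
      show i + 1 + k = 1 + (i + k) from by rw [Nat.add_assoc, Nat.add_left_comm],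
      ← Nat.add_assoc] at h1
  exact Nat.add_right_cancel h1

theorem pvArith_lt (x y bl i : Nat) (hi : i < bl)
    (h1 : x + bl = y + (min i bl + (bl - (i + 1)))) : x < y :=
  Nat.lt_of_lt_of_eq (Nat.lt_succ_self x) (pvArith_core x y bl i hi h1)

theorem pvArith_pred (x y bl i : Nat) (hi : i < bl)
    (h1 : x + bl = y + (min i bl + (bl - (i + 1)))) : x = y - 1 := by
  rw [← pvArith_core x y bl i hi h1, Nat.add_sub_cancel]

-- removing one ticket (position i of the looked-up list) strictly shrinks the measure
theorem totalLen_remove_lt (data : List (String × List String)) (k : String) (i : Nat)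
    (hi : i < (PySem.Dict.getD (PySem.Dict.mk data) k []).length) :
    totalLen (setKey data k ((PySem.Dict.getD (PySem.Dict.mk data) k []).take i ++
        (PySem.Dict.getD (PySem.Dict.mk data) k []).drop (i + 1))) < totalLen data := by
  have h := getD_eq_some_of_lt data k i hi
  have h1 := totalLen_setKey data k _ (((PySem.Dict.mk data).getD k []).take i ++ ((PySem.Dict.mk data).getD k []).drop (i + 1)) h
  simp only [List.length_append, List.length_take, List.length_drop] at h1
  exact pvArith_lt _ _ _ i hi h1

-- A, step for step: base case `len(travel) > n`; `backup = data[travel[-1]] if travel[-1] in data else []`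
-- (= Dict.getD with default []); the loop
-- `for i in range(len(backup)): data[k] = backup[:i]+backup[i+1:]; result += dfs(...); data[k] = backup`
-- (mutation + restore is, purely, recursion on the updated map; the restore line is the identity here).
def dfs (data : List (String × List String)) (travel : List String) (n : Int) : List (List String) :=
  if PySem.List.len travel > n then [travel]
  else
    let last := PySem.List.pyGetD travel (-1) ""     -- travel[-1]; total form, Pre_ keeps it in range
    let backup := PySem.Dict.getD (PySem.Dict.mk data) last []
    (List.range backup.length).attach.flatMap (fun i =>
      dfs (setKey data last (backup.take i.1 ++ backup.drop (i.1 + 1)))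
          (travel ++ [backup[i.1]'(List.mem_range.mp i.2)]) n)
termination_by totalLen data
decreasing_by exact totalLen_remove_lt data (PySem.List.pyGetD travel (-1) "") i.1 (List.mem_range.mp i.2)

-- ===== PORT B =====
-- factorial-exponential weight of one stack frame: bounds the work the frame can spawn
def frameW (t : Nat) : Nat := t.factorial * 2 ^ t

-- each of the ≤ t children of a frame of weight frameW t weighs frameW (t-1): the stack measure drops
theorem pvFrameSum_lt {α : Type} (w : α → Nat) (C R : List α) (t : Nat)
    (hk : C.length ≤ t) (hC : ∀ c ∈ C, w c = frameW (t - 1)) :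
    ((C ++ R).map w).sum < frameW t + (R.map w).sum := by
  rw [List.map_append, List.sum_append]
  have h1 : (C.map w).sum = C.length * frameW (t - 1) := by
    rw [List.map_congr_left hC, List.map_const', List.sum_replicate, smul_eq_mul]
  have h2 : C.length * frameW (t - 1) < frameW t := by
    rcases t with _ | s
    · have : C.length = 0 := by omega
      simp [this, frameW]
    · have hpos : 0 < frameW s := by unfold frameW; positivity
      have e : frameW (s + 1) = 2 * ((s + 1) * frameW s) := by
        unfold frameW; rw [Nat.factorial_succ, pow_succ]; ring
      have hle : C.length * frameW (s + 1 - 1) ≤ (s + 1) * frameW s := by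
        simpa using Nat.mul_le_mul_right _ hk
      have hp : 0 < (s + 1) * frameW s := by positivity
      omega
  rw [h1]
  exact Nat.add_lt_add_right h2 _

-- the popped frame has positive weight: the measure drops when a frame is retired
theorem pvPopDec (frame : List String × List (String × List String))
    (rest : List (List String × List (String × List String))) :
    (List.map (fun f => frameW (totalLen f.2)) rest).sum <
      (List.map (fun f => frameW (totalLen f.2)) (frame :: rest)).sum := by
  simp only [List.map_cons, List.sum_cons]
  have : 0 < frameW (totalLen frame.2) := by unfold frameW; positivity
  exact Nat.lt_add_of_pos_left this

-- pushing the children of a frame still shrinks the measure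
theorem pvPushDec (frame : List String × List (String × List String))
    (rest : List (List String × List (String × List String))) (last : String) :
    (List.map (fun f => frameW (totalLen f.2))
        ((List.range (PySem.Dict.getD (PySem.Dict.mk frame.2) last []).length).attach.map (fun i =>
          (frame.1 ++ [(PySem.Dict.getD (PySem.Dict.mk frame.2) last [])[i.1]'(List.mem_range.mp i.2)],
           setKey frame.2 last ((PySem.Dict.getD (PySem.Dict.mk frame.2) last []).take i.1 ++
             (PySem.Dict.getD (PySem.Dict.mk frame.2) last []).drop (i.1 + 1)))) ++ rest)).sum <
      (List.map (fun f => frameW (totalLen f.2)) (frame :: rest)).sum := by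
  rw [List.map_cons, List.sum_cons]
  refine pvFrameSum_lt _ _ _ (totalLen frame.2) ?_ ?_
  · simp only [List.length_map, List.length_attach, List.length_range]
    rcases hq : PySem.Dict.get? (PySem.Dict.mk frame.2) last with _ | b
    · simp [PySem.Dict.getD, hq]
    · have := totalLen_lt_of_get? frame.2 last b hq
      simpa [PySem.Dict.getD, hq] using this
  · intro c hc
    simp only [List.mem_map, List.mem_attach, true_and] at hc
    obtain ⟨i, rfl⟩ := hc
    have hi' := List.mem_range.mp i.2
    have h := getD_eq_some_of_lt frame.2 last i.1 hi'
    have h1 := totalLen_setKey frame.2 last _ (((PySem.Dict.mk frame.2).getD last []).take i.1 ++ ((PySem.Dict.mk frame.2).getD last []).drop (i.1 + 1)) h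
    simp only [List.length_append, List.length_take, List.length_drop] at h1
    congr 1
    exact pvArith_pred _ _ _ i.1 hi' h1

-- the while loop of B; the Lean stack holds Python's stack reversed (head = top),
-- so Python's `stack.pop()` is the head and `stack.extend(reversed(children))` is `children ++ rest`.
def dfsLoop (n : Int) (stack : List (List String × List (String × List String)))
    (results : List (List String)) : List (List String) :=
  match stack with
  | [] => results
  | frame :: rest =>
      if PySem.List.len frame.1 > n then dfsLoop n rest (results ++ [frame.1])
      else
        let last := PySem.List.pyGetD frame.1 (-1) ""      -- path[-1]
        let backup := PySem.Dict.getD (PySem.Dict.mk frame.2) last []  -- avail.get(path[-1], [])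
        let children := (List.range backup.length).attach.map (fun i =>
          (frame.1 ++ [backup[i.1]'(List.mem_range.mp i.2)],
           setKey frame.2 last (backup.take i.1 ++ backup.drop (i.1 + 1))))
        dfsLoop n (children ++ rest) results
termination_by (stack.map (fun f => frameW (totalLen f.2))).sum
decreasing_by
  · exact pvPopDec frame rest
  · exact pvPushDec frame rest (PySem.List.pyGetD frame.1 (-1) "")

-- B: seed the stack with one frame holding a copy of the ticket map (copying is the identity
-- on immutable values) and run the loop.
def dfs_alt (data : List (String × List String)) (travel : List String) (n : Int) : List (List String) :=
  dfsLoop n [(travel, data)] []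

-- ===== PRECONDITION & SPEC =====
-- A raises IndexError on travel = [] with 0 ≤ n (it evaluates travel[-1]); B raises there too.
def Pre_dfs (data : List (String × List String)) (travel : List String) (n : Int) : Prop :=
  travel ≠ [] ∨ n < 0
instance (data : List (String × List String)) (travel : List String) (n : Int) : Decidable (Pre_dfs data travel n) := by unfold Pre_dfs; infer_instance
def pvWitness_dfs : (List (String × List String)) × List String × Int :=
  ([("ICN", ["JFK", "HND"]), ("JFK", ["HND"]), ("HND", ["JFK"])], ["ICN"], 3)

def Spec_dfs (data : List (String × List String)) (travel : List String) (n : Int) (out : List (List String)) : Prop := out = dfs_alt data travel n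
instance (data : List (String × List String)) (travel : List String) (n : Int) (out : List (List String)) : Decidable (Spec_dfs data travel n out) := by unfold Spec_dfs; infer_instance

-- ===== CLAIM (what is proved, stated in full; the proofs are below) =====
def Claim_equal_dfs : Prop := ∀ (data : List (String × List String)) (travel : List String) (n : Int), Dom_dfs data travel n → Pre_dfs data travel n → Spec_dfs data travel n (dfs data travel n)

-- ===== LEMMAS AND PROOFS =====

-- loop invariant: the stack machine emits, after `results`, the concatenation of the
-- recursive DFS of each pending frame, in stack order.
theorem dfsLoop_eq (n : Int) (stack : List (List String × List (String × List String)))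
    (results : List (List String)) :
    dfsLoop n stack results = results ++ stack.flatMap (fun f => dfs f.2 f.1 n) := by
  fun_induction dfsLoop n stack results with
  | case1 results => simp
  | case2 results frame rest hgt ih =>
      rw [ih, List.flatMap_cons, dfs]
      have hgt' : n < (frame.1.length : Int) := by simpa using hgt
      simp [hgt']
  | case3 results frame rest hgt last backup children ih =>
      rw [ih, List.flatMap_append, List.flatMap_cons, dfs]
      have hgt' : ¬ n < (frame.1.length : Int) := by simpa using hgt
      simp only [PySem.List.len_eq, hgt', if_false, children, List.flatMap_map]
      rfl

-- ===== VERDICT (by name: the statement is the Claim_ definition above) =====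
theorem dfs_spec : Claim_equal_dfs := by
  intro data travel n _ _
  unfold Spec_dfs dfs_alt
  rw [dfsLoop_eq]
  simp
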